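-- pv_equiv track=rewrite | github.com/miguelbper/jane-street-puzzles | 2025/2025-05-number-cross-5.py | compute_fibonacci_lists
-- ===== SOURCE A (Python) =====
-- N = 11
--
-- def compute_fibonacci_lists(n: int) -> list[list[int]]:
--     """Generate lists of Fibonacci numbers with n or fewer digits, excluding
--     numbers containing zero."""
--     lists = [[] for _ in range(N + 1)]
--     a, b = 0, 1
--     while b < 10**n:
--         if "0" not in str(b):
--             lists[len(str(b))].append(b)
--         a, b = b, a + b
--     return lists
-- ===== SOURCE B (Python) =====
-- N = 11
--
-- def compute_fibonacci_lists(n: int) -> list[list[int]]: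
--     """Generate lists of Fibonacci numbers with n or fewer digits, excluding
--     numbers containing zero."""
--     fibs = []
--     a, b = 0, 1
--     while b < 10**n:
--         fibs.append(b)
--         a, b = b, a + b
--     return [[x for x in fibs if len(str(x)) == d and "0" not in str(x)] for d in range(N + 1)]
-- ===== Notes on version B (the rewrite author's own statement) =====
-- stated objective: alternative
-- what changed: B splits A's fused while-loop into two phases: one loop generating the flat list of all Fibonacci values below 10**n, then a per-digit-length list comprehension that builds each bucket by filtering that flat list, instead of appending into a fixed-size table during generation.
import Mathlib
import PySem

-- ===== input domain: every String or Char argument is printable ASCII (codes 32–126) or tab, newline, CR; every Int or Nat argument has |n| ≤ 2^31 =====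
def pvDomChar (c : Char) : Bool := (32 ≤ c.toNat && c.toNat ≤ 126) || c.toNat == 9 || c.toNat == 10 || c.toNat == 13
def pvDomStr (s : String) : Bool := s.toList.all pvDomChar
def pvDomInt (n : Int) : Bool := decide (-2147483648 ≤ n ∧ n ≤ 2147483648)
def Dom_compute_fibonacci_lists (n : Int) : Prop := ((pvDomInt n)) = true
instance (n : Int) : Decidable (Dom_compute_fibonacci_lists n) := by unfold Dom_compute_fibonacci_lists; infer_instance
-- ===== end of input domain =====

-- B generates the flat Fibonacci list first and then builds each digit-length bucket by
-- filtering it (alternative decomposition, same cost); equivalence proved for n ≤ 11.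

-- `10**n` as used in the loop bound: for n < 0 Python yields a float < 1, so `b < 10**n`
-- is False from the start (b ≥ 1); modelled by limit 0. Exact for the loop condition.
def pvLimit (n : Int) : Int := if 0 ≤ n then (10:Int) ^ n.toNat else 0

-- fuel for the while-loops: for every n ≤ 11 the loop runs < 5*n+10 times (Fibonacci
-- numbers grow by a factor φ > 10^(1/5)); both ports use the same fuel.
def pvFuel (n : Int) : Nat := (5 * n + 10).toNat

-- ===== PORT A =====
-- lists[i].append(x); out-of-range i (IndexError in Python) is excluded by Pre_ and made a no-op here
def pvAppendAt (lists : List (List Int)) (i : Nat) (x : Int) : List (List Int) :=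
  match lists, i with
  | [], _ => []
  | l :: ls, 0 => (l ++ [x]) :: ls
  | l :: ls, i+1 => l :: pvAppendAt ls i x

-- the body of A's while-loop: if "0" not in str(b): lists[len(str(b))].append(b)
def pvStep (lists : List (List Int)) (b : Int) : List (List Int) :=
  if PySem.Chars.isIn ['0'] (PySem.Int.toChars b) then lists
  else pvAppendAt lists (PySem.Int.toChars b).length b

def pvLoopA (fuel : Nat) (limit : Int) (lists : List (List Int)) (a b : Int) : List (List Int) :=
  match fuel with
  | 0 => lists
  | fuel+1 => if b < limit then pvLoopA fuel limit (pvStep lists b) b (a + b) else lists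

def compute_fibonacci_lists (n : Int) : List (List Int) :=
  pvLoopA (pvFuel n) (pvLimit n) (List.replicate 12 []) 0 1

-- ===== PORT B =====
-- first pass: collect every Fibonacci value b with b < 10**n
def pvGenFib (fuel : Nat) (limit : Int) (a b : Int) : List Int :=
  match fuel with
  | 0 => []
  | fuel+1 => if b < limit then b :: pvGenFib fuel limit b (a + b) else []

def compute_fibonacci_lists_alt (n : Int) : List (List Int) :=
  let fibs := pvGenFib (pvFuel n) (pvLimit n) 0 1
  (PySem.List.pyRange 0 12 1).map (fun d =>
    fibs.filter (fun x =>
      (((PySem.Int.toChars x).length : Int) == d) && !PySem.Chars.isIn ['0'] (PySem.Int.toChars x)))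

-- ===== PRECONDITION & SPEC =====
-- Pre_ excludes exactly n ≥ 12, where A raises IndexError (a zero-free Fibonacci number
-- with more than N = 11 digits is appended past the fixed-size table); A returns on all n ≤ 11.
def Pre_compute_fibonacci_lists (n : Int) : Prop := n ≤ 11
instance (n : Int) : Decidable (Pre_compute_fibonacci_lists n) := by
  unfold Pre_compute_fibonacci_lists; infer_instance

def pvWitness_compute_fibonacci_lists : Int := 4

def Spec_compute_fibonacci_lists (n : Int) (out : List (List Int)) : Prop :=
  out = compute_fibonacci_lists_alt n
instance (n : Int) (out : List (List Int)) : Decidable (Spec_compute_fibonacci_lists n out) := by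
  unfold Spec_compute_fibonacci_lists; infer_instance

-- ===== CLAIM (what is proved, stated in full; the proofs are below) =====
def Claim_equal_compute_fibonacci_lists : Prop :=
  ∀ (n : Int), Dom_compute_fibonacci_lists n → Pre_compute_fibonacci_lists n →
    Spec_compute_fibonacci_lists n (compute_fibonacci_lists n)

-- ===== LEMMAS AND PROOFS =====

-- A's fused loop is the fold of its body over the flat list B generates
theorem pvLoopA_eq_foldl (fuel : Nat) (limit : Int) :
    ∀ (lists : List (List Int)) (a b : Int),
      pvLoopA fuel limit lists a b = (pvGenFib fuel limit a b).foldl pvStep lists := by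
  induction fuel with
  | zero => intro lists a b; simp [pvLoopA, pvGenFib]
  | succ fuel ih =>
    intro lists a b
    simp only [pvLoopA, pvGenFib]
    split
    · simp [ih]
    · simp

theorem pvAppendAt_getElem? (lists : List (List Int)) (i : Nat) (x : Int) (d : Nat) :
    (pvAppendAt lists i x)[d]? =
      if d = i then lists[d]?.map (· ++ [x]) else lists[d]? := by
  induction lists generalizing i d with
  | nil => simp [pvAppendAt]
  | cons l ls ih =>
    cases i with
    | zero =>
      cases d with
      | zero => simp [pvAppendAt]
      | succ d => simp [pvAppendAt]
    | succ i =>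
      cases d with
      | zero => simp [pvAppendAt]
      | succ d =>
        simp only [pvAppendAt, List.getElem?_cons_succ]
        rw [ih i d]
        simp

-- the per-element predicate of bucket d (Nat form)
def pvPred (d : Nat) (x : Int) : Bool :=
  ((PySem.Int.toChars x).length == d) && !PySem.Chars.isIn ['0'] (PySem.Int.toChars x)

theorem pvStep_getElem? (lists : List (List Int)) (x : Int) (d : Nat) :
    (pvStep lists x)[d]? =
      lists[d]?.map (· ++ (if pvPred d x then [x] else [])) := by
  unfold pvStep pvPred
  by_cases hz : PySem.Chars.isIn ['0'] (PySem.Int.toChars x)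
  · simp [hz]
  · simp only [if_neg hz]
    rw [pvAppendAt_getElem? lists _ x d]
    have hnz : (!PySem.Chars.isIn ['0'] (PySem.Int.toChars x)) = true := by simp [hz]
    rw [hnz, Bool.and_true]
    by_cases hd : d = (PySem.Int.toChars x).length
    · simp [hd]
    · have hb : ((PySem.Int.toChars x).length == d) = false := by simp [Ne.symm hd]
      rw [if_neg hd, hb]
      simp

theorem pvFoldl_getElem? (L : List Int) (lists : List (List Int)) (d : Nat) :
    (L.foldl pvStep lists)[d]? = lists[d]?.map (· ++ L.filter (pvPred d)) := by
  induction L generalizing lists with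
  | nil => cases h : lists[d]? <;> simp [h]
  | cons x L ih =>
    simp only [List.foldl_cons]
    rw [ih (pvStep lists x), pvStep_getElem? lists x d]
    by_cases hp : pvPred d x <;> cases h : lists[d]? <;> simp [hp]

-- B's Int-valued bucket predicate agrees with the Nat form on bucket index d
theorem pvFilter_int_eq_nat (L : List Int) (d : Nat) :
    (L.filter (fun x =>
        (((PySem.Int.toChars x).length : Int) == (d : Int)) &&
          !PySem.Chars.isIn ['0'] (PySem.Int.toChars x))) = L.filter (pvPred d) := by
  apply List.filter_congr
  intro x _
  unfold pvPred
  have hb : (((PySem.Int.toChars x).length : Int) == (d : Int)) =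
      ((PySem.Int.toChars x).length == d) := by
    by_cases hd : (PySem.Int.toChars x).length = d
    · simp [hd]
    · simp [hd]
  rw [hb]

-- ===== VERDICT (by name: the statement is the Claim_ definition above) =====
theorem compute_fibonacci_lists_spec : Claim_equal_compute_fibonacci_lists := by
  intro n _ _
  unfold Spec_compute_fibonacci_lists compute_fibonacci_lists compute_fibonacci_lists_alt
  rw [pvLoopA_eq_foldl, PySem.List.pyRange_one]
  have h12 : ((12 : Int) - 0).toNat = 12 := by decide
  rw [h12, List.map_map]
  apply List.ext_getElem?
  intro d
  rw [pvFoldl_getElem?]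
  by_cases hd : d < 12
  · simp only [List.getElem?_replicate, List.getElem?_map, List.getElem?_range, hd, if_pos,
      Option.map_some, Function.comp_apply, zero_add, List.nil_append]
    rw [pvFilter_int_eq_nat]
  · simp [hd]
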